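-- pv_equiv track=rewrite | github.com/GennadyAK/Homework | homework1102242.py | coord
-- ===== SOURCE A (Python) =====
-- def coord(point: str) -> tuple:
--     if not set(point) <= {'S', 'N', 'W', 'E'}:
--         return ValueError ("Введите координаты S, N, W или E")
--     x = 0
--     y = 0
--     for value in point:
--         if value == "S":
--             y -= 1
--         elif value == "N":
--             y += 1
--         elif value == "W":
--             x -= 1
--         elif value == "E":
--             x += 1
--     res_point = (x, y)
--     return res_point
-- ===== SOURCE B (Python) =====
-- def coord(point: str) -> tuple:
--     if not set(point) <= {'S', 'N', 'W', 'E'}: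
--         return ValueError ("Введите координаты S, N, W или E")
--     return (point.count('E') - point.count('W'),
--             point.count('N') - point.count('S'))
-- ===== Notes on version B (the rewrite author's own statement) =====
-- stated objective: simpler
-- what changed: Replaces the single branching accumulator loop with four independent counting scans: x = count('E')-count('W'), y = count('N')-count('S'); the if/elif state machine disappears. (Pre_ excludes strings with characters outside SNWE, on which A returns a ValueError object rather than a tuple; B returns the same object).
import Mathlib
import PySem

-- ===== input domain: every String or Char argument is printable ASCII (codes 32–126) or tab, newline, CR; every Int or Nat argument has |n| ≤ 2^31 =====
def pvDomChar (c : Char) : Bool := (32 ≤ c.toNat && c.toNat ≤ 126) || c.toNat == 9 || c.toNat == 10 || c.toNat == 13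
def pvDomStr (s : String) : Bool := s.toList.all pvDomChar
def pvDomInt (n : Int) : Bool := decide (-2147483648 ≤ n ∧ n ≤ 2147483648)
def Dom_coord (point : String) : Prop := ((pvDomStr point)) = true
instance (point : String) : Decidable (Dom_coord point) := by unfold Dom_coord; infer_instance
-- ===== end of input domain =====

-- B replaces A's single branching accumulator loop with four independent character counts (simpler).
-- On strings containing a character other than S/N/W/E the Python returns a ValueError OBJECT
-- (not a tuple); those inputs lie outside Pre_coord and the ports return (0, 0) there arbitrarily.

-- ===== PORT A =====
def coord (point : String) : Int × Int :=
  if ¬ point.toList.all (fun c => c ∈ ['S', 'N', 'W', 'E']) then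
    (0, 0)  -- Python A returns a ValueError object here (not a tuple); outside Pre_coord
  else
    -- x = 0; y = 0; for value in point: if/elif chain
    let xy := point.toList.foldl (fun (xy : Int × Int) value =>
      if value == 'S' then (xy.1, xy.2 - 1)
      else if value == 'N' then (xy.1, xy.2 + 1)
      else if value == 'W' then (xy.1 - 1, xy.2)
      else if value == 'E' then (xy.1 + 1, xy.2)
      else xy) (0, 0)
    xy

-- ===== PORT B =====
def coord_alt (point : String) : Int × Int :=
  if ¬ point.toList.all (fun c => c ∈ ['S', 'N', 'W', 'E']) then
    (0, 0)  -- Python B returns the same ValueError object here; outside Pre_coord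
  else
    ((point.toList.count 'E' : Int) - (point.toList.count 'W' : Int),
     (point.toList.count 'N' : Int) - (point.toList.count 'S' : Int))

-- ===== PRECONDITION & SPEC =====
-- Pre_ excludes exactly the strings with a character outside S/N/W/E, on which A returns a
-- ValueError object rather than a tuple of ints.
def Pre_coord (point : String) : Prop :=
  point.toList.all (fun c => c == 'S' || c == 'N' || c == 'W' || c == 'E') = true
instance (point : String) : Decidable (Pre_coord point) := by unfold Pre_coord; infer_instance
def pvWitness_coord : String := "N"

def Spec_coord (point : String) (out : Int × Int) : Prop := out = coord_alt point
instance (point : String) (out : Int × Int) : Decidable (Spec_coord point out) := by unfold Spec_coord; infer_instance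

-- ===== CLAIM (what is proved, stated in full; the proofs are below) =====
def Claim_equal_coord : Prop := ∀ (point : String), Dom_coord point → Pre_coord point → Spec_coord point (coord point)

-- ===== LEMMAS AND PROOFS =====
theorem coord_loop_eq (l : List Char) (x y : Int)
    (h : ∀ c ∈ l, c ∈ ['S', 'N', 'W', 'E']) :
    l.foldl (fun (xy : Int × Int) value =>
      if value == 'S' then (xy.1, xy.2 - 1)
      else if value == 'N' then (xy.1, xy.2 + 1)
      else if value == 'W' then (xy.1 - 1, xy.2)
      else if value == 'E' then (xy.1 + 1, xy.2)
      else xy) (x, y)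
    = (x + (l.count 'E' : Int) - (l.count 'W' : Int),
       y + (l.count 'N' : Int) - (l.count 'S' : Int)) := by
  induction l generalizing x y with
  | nil => simp
  | cons c t ih =>
    have hc : c ∈ ['S', 'N', 'W', 'E'] := h c (by simp)
    have ht : ∀ c ∈ t, c ∈ ['S', 'N', 'W', 'E'] := fun c hm => h c (by simp [hm])
    simp only [List.mem_cons, List.mem_singleton, List.not_mem_nil, or_false] at hc
    rcases hc with rfl | rfl | rfl | rfl
    · rw [List.foldl_cons]
      refine (ih x (y - 1) ht).trans ?_
      norm_num [List.count_cons, Prod.ext_iff]; omega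
    · rw [List.foldl_cons]
      refine (ih x (y + 1) ht).trans ?_
      norm_num [List.count_cons, Prod.ext_iff]; omega
    · rw [List.foldl_cons]
      refine (ih (x - 1) y ht).trans ?_
      norm_num [List.count_cons, Prod.ext_iff]; omega
    · rw [List.foldl_cons]
      refine (ih (x + 1) y ht).trans ?_
      norm_num [List.count_cons, Prod.ext_iff]; omega

theorem coord_spec' (point : String) (hp : Pre_coord point) :
    coord point = coord_alt point := by
  unfold Pre_coord at hp
  simp only [List.all_eq_true, Bool.or_eq_true, beq_iff_eq] at hp
  have hp' : ∀ c ∈ point.toList, c ∈ ['S', 'N', 'W', 'E'] := by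
    intro c hc; have := hp c hc; simp only [List.mem_cons, List.not_mem_nil, or_false]; tauto
  unfold coord coord_alt
  have hall : point.toList.all (fun c => c ∈ ['S', 'N', 'W', 'E']) = true := by
    simp only [List.all_eq_true]
    intro c hc; simpa using hp' c hc
  simp only [hall, not_true, Bool.not_true, Bool.false_eq_true, if_false, reduceIte]
  simpa using coord_loop_eq point.toList 0 0 hp'

-- ===== VERDICT (by name: the statement is the Claim_ definition above) =====
theorem coord_spec : Claim_equal_coord := by
  intro point _ hp
  exact coord_spec' point hp
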